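-- pv_equiv track=rewrite | github.com/brnnmchl/pathfinder_chargen | character_creator.py | abilityMods
-- ===== SOURCE A (Python) =====
-- def abilityMods(scores):
--     modifiers = []
--
--     for score in scores:
--         if score >= 18:
--             modifiers.append("+4")
--         elif score >= 16:
--             modifiers.append("+3")
--         elif score >= 14:
--             modifiers.append("+2")
--         elif score >= 12:
--             modifiers.append("+1")
--         elif score >= 10:
--             modifiers.append("0")
--         elif score >= 8:
--             modifiers.append("-1")
--         else:
--             modifiers.append("-2")
--
--     return modifiers
-- ===== SOURCE B (Python) =====
-- def abilityMods(scores):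
--     mods = []
--     for score in scores:
--         m = max(-2, min(4, (score - 10) // 2))
--         mods.append(f"+{m}" if m > 0 else str(m))
--     return mods
-- ===== Notes on version B (the rewrite author's own statement) =====
-- stated objective: simpler
-- what changed: Replaces the 7-branch threshold chain with the closed-form clamped modifier max(-2, min(4, (score-10)//2)) plus sign formatting.
import Mathlib
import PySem

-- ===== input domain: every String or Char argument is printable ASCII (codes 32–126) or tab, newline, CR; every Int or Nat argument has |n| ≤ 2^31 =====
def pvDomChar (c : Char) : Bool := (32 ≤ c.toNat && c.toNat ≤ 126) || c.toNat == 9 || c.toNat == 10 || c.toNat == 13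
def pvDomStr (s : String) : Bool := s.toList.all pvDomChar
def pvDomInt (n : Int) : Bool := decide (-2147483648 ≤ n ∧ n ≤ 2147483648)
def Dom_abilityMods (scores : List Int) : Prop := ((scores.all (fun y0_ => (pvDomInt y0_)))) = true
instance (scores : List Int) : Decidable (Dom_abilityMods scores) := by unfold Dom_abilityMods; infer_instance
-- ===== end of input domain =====

-- B replaces A's 7-branch threshold chain by the closed-form clamped modifier max(-2, min(4, (score-10)//2)) with sign formatting (objective: simpler).


-- ===== PORT A =====
-- Port of A: the branch chain, appended via foldl as in the Python loop.
def abilityMods (scores : List Int) : List String :=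
  scores.foldl (fun modifiers score =>
    modifiers ++ [if score ≥ 18 then "+4"
      else if score ≥ 16 then "+3"
      else if score ≥ 14 then "+2"
      else if score ≥ 12 then "+1"
      else if score ≥ 10 then "0"
      else if score ≥ 8 then "-1"
      else "-2"]) []

-- ===== PORT B =====
-- Port of B: closed-form clamped modifier plus sign formatting.
def pvFmt (m : Int) : String := if m > 0 then "+" ++ PySem.Int.toStr m else PySem.Int.toStr m
def abilityMods_alt (scores : List Int) : List String :=
  scores.foldl (fun mods score =>
    mods ++ [pvFmt (max (-2) (min 4 (PySem.Int.floordiv (score - 10) 2)))]) []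

-- ===== PRECONDITION & SPEC =====
def Spec_abilityMods (scores : List Int) (out : List String) : Prop := out = abilityMods_alt scores
instance (scores : List Int) (out : List String) : Decidable (Spec_abilityMods scores out) := by unfold Spec_abilityMods; infer_instance

-- ===== CLAIM (what is proved, stated in full; the proofs are below) =====
def Claim_equal_abilityMods : Prop := ∀ (scores : List Int), Dom_abilityMods scores → Spec_abilityMods scores (abilityMods scores)

-- ===== LEMMAS AND PROOFS =====

-- ===== VERDICT (by name: the statement is the Claim_ definition above) =====
theorem pointwise (score : Int) :
    (if score ≥ 18 then "+4"
      else if score ≥ 16 then "+3"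
      else if score ≥ 14 then "+2"
      else if score ≥ 12 then "+1"
      else if score ≥ 10 then "0"
      else if score ≥ 8 then "-1"
      else "-2")
    = pvFmt (max (-2) (min 4 (PySem.Int.floordiv (score - 10) 2))) := by
  rw [PySem.Int.floordiv_eq_ediv_of_pos (by omega : (0:Int) < 2)]
  split_ifs with h1 h2 h3 h4 h5 h6
  · have : max (-2) (min 4 ((score - 10) / 2)) = 4 := by omega
    rw [this]; rfl
  · have : max (-2) (min 4 ((score - 10) / 2)) = 3 := by omega
    rw [this]; rfl
  · have : max (-2) (min 4 ((score - 10) / 2)) = 2 := by omega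
    rw [this]; rfl
  · have : max (-2) (min 4 ((score - 10) / 2)) = 1 := by omega
    rw [this]; rfl
  · have : max (-2) (min 4 ((score - 10) / 2)) = 0 := by omega
    rw [this]; rfl
  · have : max (-2) (min 4 ((score - 10) / 2)) = -1 := by omega
    rw [this]; rfl
  · have : max (-2) (min 4 ((score - 10) / 2)) = -2 := by omega
    rw [this]; rfl

theorem foldl_agree (scores : List Int) (acc : List String) :
    scores.foldl (fun modifiers score =>
      modifiers ++ [if score ≥ 18 then "+4"
        else if score ≥ 16 then "+3"
        else if score ≥ 14 then "+2"
        else if score ≥ 12 then "+1"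
        else if score ≥ 10 then "0"
        else if score ≥ 8 then "-1"
        else "-2"]) acc
    = scores.foldl (fun mods score =>
        mods ++ [pvFmt (max (-2) (min 4 (PySem.Int.floordiv (score - 10) 2)))]) acc := by
  induction scores generalizing acc with
  | nil => rfl
  | cons s t ih => simp only [List.foldl_cons, pointwise]

theorem abilityMods_spec : Claim_equal_abilityMods := by
  intro scores _
  unfold Spec_abilityMods abilityMods abilityMods_alt
  exact foldl_agree scores []
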